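-- pv_equiv track=rewrite | github.com/ucv-cs/Fundamentele-algebrice-ale-informaticii | T5_primes.py | display_factors
-- ===== SOURCE A (Python) =====
-- def display_factors(factors):
-- 	"""
-- 	Afișează factorii primi în formă canonică
-- 	 param factors: lista de factori primi
-- 	 return: text cu forma canonică
-- 	 rtype: string
-- 	"""
-- 	factor_dict = dict() #{baza: exponent}
-- 	for i in range(len(factors)):
-- 		base = factors[i]
-- 		if base not in factor_dict:
-- 			exponent = 0
-- 			for j in range(len(factors)):
-- 				if base == factors[j]:
-- 					exponent += 1
-- 			factor_dict[base] = exponent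
--
-- 	result = []
-- 	for i in sorted(factor_dict.keys()):
-- 		exp = to_superscript(factor_dict[i]) if factor_dict[i] > 1 else ''
-- 		result += [f'{i}{exp}']
--
-- 	return ' * '.join(result)
--
-- def to_superscript(e):
-- 	"""
-- 	Convertește un indice numeric în superscript
-- 	(în consolă, numai cu fonturi care suportă UTF-8,
-- 	ex. Consolas, nu Lucida Console)
-- 	 param e: string reprezentând un număr
-- 	 return: string cu numărul superscript
-- 	 rtype: string
-- 	"""
-- 	#transformă inputul numeric în string, apoi stringul
-- 	# într-o listă conținând ca element fiecare caracter
-- 	s = list(str(e))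
-- 	e = '' #rezultatul
--
-- 	#iterează în listă și înlocuiește fiecare caracter numeric
-- 	# cu forma lui de exponent (superscript)
-- 	for c in s:
-- 		if c == '0':
-- 			e += '\u2070'
-- 		elif c == '1':
-- 			e += '\u00b9'
-- 		elif c == '2':
-- 			e += '\u00b2'
-- 		elif c == '3':
-- 			e += '\u00b3'
-- 		elif c == '4':
-- 			e += '\u2074'
-- 		elif c == '5':
-- 			e += '\u2075'
-- 		elif c == '6':
-- 			e += '\u2076'
-- 		elif c == '7':
-- 			e += '\u2077'
-- 		elif c == '8':
-- 			e += '\u2078'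
-- 		elif c == '9':
-- 			e += '\u2079'
--
-- 	return e
-- ===== SOURCE B (Python) =====
-- def to_superscript(e):
-- 	s = list(str(e))
-- 	e = ''
-- 	for c in s:
-- 		if c == '0':
-- 			e += '\u2070'
-- 		elif c == '1':
-- 			e += '\u00b9'
-- 		elif c == '2':
-- 			e += '\u00b2'
-- 		elif c == '3':
-- 			e += '\u00b3'
-- 		elif c == '4':
-- 			e += '\u2074'
-- 		elif c == '5':
-- 			e += '\u2075'
-- 		elif c == '6':
-- 			e += '\u2076'
-- 		elif c == '7':
-- 			e += '\u2077'
-- 		elif c == '8':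
-- 			e += '\u2078'
-- 		elif c == '9':
-- 			e += '\u2079'
-- 	return e
--
--
-- def display_factors(factors):
-- 	"""Sort once, then emit one piece per run of equal values in a single pass."""
-- 	s = sorted(factors)
-- 	parts = []
-- 	i = 0
-- 	n = len(s)
-- 	while i < n:
-- 		base = s[i]
-- 		j = i
-- 		while j < n and s[j] == base:
-- 			j += 1
-- 		count = j - i
-- 		exp = to_superscript(count) if count > 1 else ''
-- 		parts.append(f'{base}{exp}')
-- 		i = j
-- 	return ' * '.join(parts)
-- ===== Notes on version B (the rewrite author's own statement) =====
-- stated objective: faster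
-- what changed: Replaces A's quadratic build (for each element an inner full scan to count it, plus a membership test in a dict, then a sort of the keys) by sorting the list once and emitting the pieces in a single run-length pass over the sorted list.
import Mathlib
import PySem

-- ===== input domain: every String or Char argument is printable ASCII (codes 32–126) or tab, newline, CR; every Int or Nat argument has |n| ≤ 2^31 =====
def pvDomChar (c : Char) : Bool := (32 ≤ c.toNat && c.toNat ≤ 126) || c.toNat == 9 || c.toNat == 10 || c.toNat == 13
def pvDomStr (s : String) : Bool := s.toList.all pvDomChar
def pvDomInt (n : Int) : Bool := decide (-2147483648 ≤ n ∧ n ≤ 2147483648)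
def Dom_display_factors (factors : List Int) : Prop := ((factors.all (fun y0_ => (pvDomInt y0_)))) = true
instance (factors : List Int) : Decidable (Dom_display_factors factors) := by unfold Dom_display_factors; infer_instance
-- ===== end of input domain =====

-- B sorts the list once and emits the canonical form in a single run-length pass,
-- instead of A's per-element full rescans into a dict followed by a key sort (return value only; neither mutates its argument).

-- shared helper (both Pythons use the same to_superscript)
def to_superscript (e : Int) : String :=
  String.ofList ((PySem.Int.toChars e).foldl (fun acc c =>
    if c = '0' then acc ++ ['\u2070']
    else if c = '1' then acc ++ ['\u00b9']
    else if c = '2' then acc ++ ['\u00b2']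
    else if c = '3' then acc ++ ['\u00b3']
    else if c = '4' then acc ++ ['\u2074']
    else if c = '5' then acc ++ ['\u2075']
    else if c = '6' then acc ++ ['\u2076']
    else if c = '7' then acc ++ ['\u2077']
    else if c = '8' then acc ++ ['\u2078']
    else if c = '9' then acc ++ ['\u2079']
    else acc) [])

-- ===== PORT A =====
def display_factors (factors : List Int) : String :=
  let factor_dict : PySem.Dict Int Int :=
    (PySem.List.pyRange 0 (PySem.List.len factors) 1).foldl (fun d i =>
      let base := PySem.List.pyGetD factors i 0
      if d.contains base = false then
        let exponent : Int :=
          (PySem.List.pyRange 0 (PySem.List.len factors) 1).foldl (fun e j =>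
            if base = PySem.List.pyGetD factors j 0 then e + 1 else e) 0
        d.insert base exponent
      else d) PySem.Dict.empty
  let result : List String :=
    (PySem.List.sorted factor_dict.keys (fun x => x) false).foldl (fun r i =>
      r ++ [PySem.Int.toStr i ++
        (if factor_dict.getD i 0 > 1 then to_superscript (factor_dict.getD i 0) else "")]) []
  PySem.Str.join " * " result

-- ===== PORT B =====
-- one piece 'base' or 'base^count' (Source B's f-string with the conditional exponent)
def pvPiece (base : Int) (count : Int) : String :=
  PySem.Int.toStr base ++ (if count > 1 then to_superscript count else "")

-- Source B's run-length loop over the sorted list: scan the run of the head, emit, continue after it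
def pvGroupParts : List Int → List String
  | [] => []
  | b :: rest =>
      pvPiece b (1 + ((rest.takeWhile (fun x => x == b)).length : Int))
        :: pvGroupParts (rest.dropWhile (fun x => x == b))
  termination_by s => s.length
  decreasing_by
    simpa using Nat.lt_succ_of_le (List.length_dropWhile_le _ _)

def display_factors_alt (factors : List Int) : String :=
  PySem.Str.join " * " (pvGroupParts (PySem.List.sorted factors (fun x => x) false))

-- ===== PRECONDITION & SPEC =====
def Spec_display_factors (factors : List Int) (out : String) : Prop := out = display_factors_alt factors
instance (factors : List Int) (out : String) : Decidable (Spec_display_factors factors out) := by unfold Spec_display_factors; infer_instance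

-- ===== CLAIM (what is proved, stated in full; the proofs are below) =====
def Claim_equal_display_factors : Prop := ∀ (factors : List Int), Dom_display_factors factors → Spec_display_factors factors (display_factors factors)

-- ===== LEMMAS AND PROOFS =====

-- the bases of the runs (proof-side skeleton of pvGroupParts)
def pvBases : List Int → List Int
  | [] => []
  | b :: rest => b :: pvBases (rest.dropWhile (fun x => x == b))
  termination_by s => s.length
  decreasing_by
    simpa using Nat.lt_succ_of_le (List.length_dropWhile_le _ _)

theorem pv_mem_bases (k : Int) : ∀ (s : List Int), k ∈ pvBases s ↔ k ∈ s := by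
  intro s
  induction s using pvBases.induct with
  | case1 => simp [pvBases]
  | case2 b rest ih =>
    rw [pvBases]
    simp only [List.mem_cons, ih]
    constructor
    · rintro (rfl | h)
      · exact Or.inl rfl
      · exact Or.inr ((List.dropWhile_sublist _).subset h)
    · rintro (rfl | h)
      · exact Or.inl rfl
      · conv at h => rw [← List.takeWhile_append_dropWhile (p := fun x => x == b) (l := rest)]
        rcases List.mem_append.mp h with h' | h'
        · exact Or.inl (by simpa using List.mem_takeWhile_imp h')
        · exact Or.inr h' 

theorem pv_notmem_dropWhile (b : Int) (rest : List Int)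
    (hp : rest.Pairwise (· ≤ ·)) (hge : ∀ y ∈ rest, b ≤ y) :
    b ∉ rest.dropWhile (fun x => x == b) := by
  induction rest with
  | nil => simp
  | cons x t ih =>
    rcases List.pairwise_cons.mp hp with ⟨hx, ht⟩
    by_cases hxb : x = b
    · subst hxb
      rw [List.dropWhile_cons_of_pos (by simp)]
      exact ih ht hx
    · rw [List.dropWhile_cons_of_neg (by simpa using fun h => hxb h)]
      have hbx : b < x := lt_of_le_of_ne (hge x (by simp)) (fun h => hxb h.symm)
      simp only [List.mem_cons, not_or]
      refine ⟨fun h => hxb h.symm, fun h => ?_⟩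
      exact absurd (hx b h) (not_le.mpr hbx)

theorem pv_lt_of_mem_dropWhile (b : Int) (rest : List Int)
    (hp : rest.Pairwise (· ≤ ·)) (hge : ∀ y ∈ rest, b ≤ y) :
    ∀ y ∈ rest.dropWhile (fun x => x == b), b < y := by
  intro y hy
  have hmem : y ∈ rest := (List.dropWhile_sublist _).subset hy
  have hne : y ≠ b := fun h => pv_notmem_dropWhile b rest hp hge (h ▸ hy)
  exact lt_of_le_of_ne (hge y hmem) (Ne.symm hne)

theorem pv_bases_pairwise : ∀ (s : List Int), s.Pairwise (· ≤ ·) → (pvBases s).Pairwise (· < ·) := by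
  intro s
  induction s using pvBases.induct with
  | case1 => intro _; simp [pvBases]
  | case2 b rest ih =>
    intro hp
    rcases List.pairwise_cons.mp hp with ⟨hb, hrest⟩
    rw [pvBases]
    refine List.pairwise_cons.mpr ⟨?_, ih (hrest.sublist (List.dropWhile_sublist _))⟩
    intro y hy
    exact pv_lt_of_mem_dropWhile b rest hrest hb y ((pv_mem_bases y _).mp hy)

theorem pv_groupParts_eq_map : ∀ (s : List Int), s.Pairwise (· ≤ ·) →
    pvGroupParts s = (pvBases s).map (fun b => pvPiece b ((s.count b : Int))) := by
  intro s
  induction s using pvBases.induct with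
  | case1 => intro _; simp [pvGroupParts, pvBases]
  | case2 b rest ih =>
    intro hp
    rcases List.pairwise_cons.mp hp with ⟨hb, hrest⟩
    have hsplit : rest.takeWhile (fun x => x == b) ++ rest.dropWhile (fun x => x == b) = rest :=
      List.takeWhile_append_dropWhile
    have hcrun : (rest.takeWhile (fun x => x == b)).count b = (rest.takeWhile (fun x => x == b)).length :=
      List.count_eq_length.mpr (fun y hy => ((by simpa using List.mem_takeWhile_imp hy : y = b)).symm)
    have hsum : ∀ j : Int, (rest.takeWhile (fun x => x == b)).count j + (rest.dropWhile (fun x => x == b)).count j = rest.count j := by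
      intro j; rw [← List.count_append, hsplit]
    have hcdrop : (rest.dropWhile (fun x => x == b)).count b = 0 :=
      List.count_eq_zero.mpr (pv_notmem_dropWhile b rest hrest hb)
    have hcount : (b :: rest).count b = 1 + (rest.takeWhile (fun x => x == b)).length := by
      have := hsum b
      rw [List.count_cons_self]
      omega
    rw [pvGroupParts, pvBases, List.map_cons, hcount]
    have hdp : (rest.dropWhile (fun x => x == b)).Pairwise (· ≤ ·) :=
      hrest.sublist (List.dropWhile_sublist _)
    rw [ih hdp]
    refine congrArg₂ _ (by push_cast; ring_nf) (List.map_congr_left ?_)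
    intro k hk
    have hkmem : k ∈ rest.dropWhile (fun x => x == b) := (pv_mem_bases k _).mp hk
    have hkb : b < k := pv_lt_of_mem_dropWhile b rest hrest hb k hkmem
    have hkrun : (rest.takeWhile (fun x => x == b)).count k = 0 :=
      List.count_eq_zero.mpr (fun h => absurd (by simpa using (List.mem_takeWhile_imp h)) (by intro h'; subst h'; exact lt_irrefl k hkb))
    have : (b :: rest).count k = (rest.dropWhile (fun x => x == b)).count k := by
      have := hsum k
      rw [List.count_cons_of_ne (Ne.symm (ne_of_gt hkb))]
      omega
    rw [this]

-- A's dict-building loop, characterised: lookup and keys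
theorem pv_dict_getD (f : Int → Int) (k : Int) :
    ∀ (l : List Int) (d : PySem.Dict Int Int),
    (l.foldl (fun d b => if d.contains b = false then d.insert b (f b) else d) d).getD k 0
      = if d.contains k then d.getD k 0 else if k ∈ l then f k else 0 := by
  intro l
  induction l with
  | nil =>
    intro d
    simp only [List.foldl_nil, List.not_mem_nil, if_false]
    split
    · rfl
    · exact PySem.Dict.getD_of_not_contains d 0 (by simp_all)
  | cons b l ih =>
    intro d
    rw [List.foldl_cons]
    by_cases hdb : d.contains b
    · rw [if_neg (by simp [hdb])]
      rw [ih d]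
      by_cases hk : d.contains k
      · simp [hk]
      · have hkb : k ≠ b := fun h => hk (h ▸ hdb)
        simp [hk, hkb]
    · rw [if_pos (by simp [hdb])]
      rw [ih (d.insert b _)]
      by_cases hk : k = b
      · subst hk
        simp [hdb]
      · simp [PySem.Dict.contains_insert, PySem.Dict.getD_insert, hk]

theorem pv_dict_mem_keys (f : Int → Int) (k : Int) :
    ∀ (l : List Int) (d : PySem.Dict Int Int),
    (k ∈ (l.foldl (fun d b => if d.contains b = false then d.insert b (f b) else d) d).keys ↔ k ∈ d.keys ∨ k ∈ l) := by
  intro l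
  induction l with
  | nil => intro d; simp
  | cons b l ih =>
    intro d
    rw [List.foldl_cons]
    by_cases hdb : d.contains b
    · rw [if_neg (by simp [hdb])]
      rw [ih d]
      have hbk : b ∈ d.keys := (PySem.Dict.contains_iff_mem_keys d b).mp hdb
      constructor
      · rintro (h | h)
        · exact Or.inl h
        · exact Or.inr (by simp [h])
      · rintro (h | h)
        · exact Or.inl h
        · rcases List.mem_cons.mp h with rfl | h'
          · exact Or.inl hbk
          · exact Or.inr h'
    · rw [if_pos (by simp [hdb])]
      rw [ih (d.insert b _)]
      rw [PySem.Dict.mem_keys_insert]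
      constructor
      · rintro ((rfl | h) | h)
        · exact Or.inr (by simp)
        · exact Or.inl h
        · exact Or.inr (by simp [h])
      · rintro (h | h)
        · exact Or.inl (Or.inr h)
        · rcases List.mem_cons.mp h with rfl | h'
          · exact Or.inl (Or.inl rfl)
          · exact Or.inr h' 

theorem pv_dict_nodup_keys (f : Int → Int) :
    ∀ (l : List Int) (d : PySem.Dict Int Int), d.keys.Nodup →
    (l.foldl (fun d b => if d.contains b = false then d.insert b (f b) else d) d).keys.Nodup := by
  intro l
  induction l with
  | nil => intro d h; simpa using h
  | cons b l ih =>
    intro d h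
    rw [List.foldl_cons]
    split
    · exact ih _ (PySem.Dict.nodup_keys_insert d b _ h)
    · exact ih d h

theorem pv_inner_count (b : Int) : ∀ (l : List Int) (e : Int),
    l.foldl (fun e x => if b = x then e + 1 else e) e = e + (l.count b : Int) := by
  intro l
  induction l with
  | nil => intro e; simp
  | cons x l ih =>
    intro e
    rw [List.foldl_cons]
    by_cases h : b = x
    · subst h
      rw [if_pos rfl, ih, List.count_cons_self]
      push_cast
      ring
    · rw [if_neg h, ih, List.count_cons_of_ne (fun h' => h h'.symm)]

-- ===== VERDICT (by name: the statement is the Claim_ definition above) =====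
theorem display_factors_spec : Claim_equal_display_factors := by
  intro factors _
  unfold Spec_display_factors
  simp only [display_factors, display_factors_alt]
  have houter :
      (PySem.List.pyRange 0 (PySem.List.len factors) 1).foldl (fun d i =>
        let base := PySem.List.pyGetD factors i 0
        if d.contains base = false then
          let exponent : Int :=
            (PySem.List.pyRange 0 (PySem.List.len factors) 1).foldl (fun e j =>
              if base = PySem.List.pyGetD factors j 0 then e + 1 else e) 0
          d.insert base exponent
        else d) PySem.Dict.empty
      = factors.foldl (fun d base =>
          if d.contains base = false then d.insert base ((factors.count base : Int)) else d)
          PySem.Dict.empty := by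
    refine Eq.trans (PySem.List.foldl_pyRange_zero_pyGetD factors 0
      (fun d base =>
        if PySem.Dict.contains d base = false then
          d.insert base ((PySem.List.pyRange 0 (PySem.List.len factors) 1).foldl (fun e j =>
            if base = PySem.List.pyGetD factors j 0 then e + 1 else e) 0)
        else d) PySem.Dict.empty) ?_
    refine congrArg (fun f => List.foldl f PySem.Dict.empty factors) (funext₂ fun d base => ?_)
    rw [PySem.List.foldl_pyRange_zero_pyGetD factors 0
      (fun e x => if base = x then e + 1 else e) 0, pv_inner_count]
    simp
  rw [houter]
  set D := factors.foldl (fun d base =>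
      if d.contains base = false then d.insert base ((factors.count base : Int)) else d)
      PySem.Dict.empty with hD
  set S := PySem.List.sorted factors (fun x => x) false with hS
  have hmemD : ∀ k, k ∈ D.keys ↔ k ∈ factors := by
    intro k
    have h := pv_dict_mem_keys (fun b => (factors.count b : Int)) k factors PySem.Dict.empty
    simpa [PySem.Dict.keys_empty] using h
  have hndD : D.keys.Nodup :=
    pv_dict_nodup_keys (fun b => (factors.count b : Int)) factors PySem.Dict.empty
      (by simp [PySem.Dict.keys_empty])
  have hgetD : ∀ k ∈ factors, D.getD k 0 = (factors.count k : Int) := by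
    intro k hk
    rw [hD, pv_dict_getD]
    simp [hk]
  have hSp : S.Pairwise (· ≤ ·) := PySem.List.sorted_pairwise factors (fun x => x)
  rw [pv_groupParts_eq_map S hSp]
  rw [PySem.List.foldl_append_singleton_eq_map (fun i =>
    PySem.Int.toStr i ++ (if D.getD i 0 > 1 then to_superscript (D.getD i 0) else "")) _ []]
  have hbn : (pvBases S).Pairwise (· < ·) := pv_bases_pairwise S hSp
  have hbnd : (pvBases S).Nodup := List.Pairwise.imp (fun h => ne_of_lt h) hbn
  have hperm : (pvBases S).Perm D.keys :=
    (List.perm_ext_iff_of_nodup hbnd hndD).mpr (fun a => by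
      rw [pv_mem_bases, hmemD, hS, PySem.List.mem_sorted])
  rw [PySem.List.sorted_eq_of_perm_of_pairwise_lt D.keys (pvBases S) (fun x => x) hperm hbn]
  rw [List.nil_append]
  refine congrArg _ (List.map_congr_left fun k hk => ?_)
  have hkf : k ∈ factors := by
    have := (pv_mem_bases k S).mp hk
    rwa [hS, PySem.List.mem_sorted] at this
  have hcS : S.count k = factors.count k := List.Perm.count_eq (PySem.List.sorted_perm factors (fun x => x) false) k
  rw [hgetD k hkf, pvPiece, hcS]
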